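-- pv_equiv track=rewrite | github.com/Hamza-Mos/praxlab | tinker/sl/gen_hard_distill.py | find_boxed
-- ===== SOURCE A (Python) =====
-- def find_boxed(text):
--     spans = []
--     i = 0
--     while i < len(text):
--         idx = text.find("\\boxed{", i)
--         if idx == -1:
--             break
--         depth = 0
--         j = idx + 6
--         while j < len(text):
--             if text[j] == '{':
--                 depth += 1
--             elif text[j] == '}':
--                 depth -= 1
--                 if depth == 0:
--                     spans.append((idx, j + 1, text[idx+7:j]))
--                     break
--             j += 1
--         i = j + 1 if j < len(text) else len(text)
--     return spans
-- ===== SOURCE B (Python) =====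
-- def find_boxed(text):
--     # Single left-to-right scan with a depth/start state machine; no str.find.
--     spans = []
--     n = len(text)
--     i = 0
--     depth = 0
--     start = 0
--     while i < n:
--         if depth == 0:
--             if text.startswith("\\boxed{", i):
--                 start = i
--                 depth = 1
--                 i += 7
--             else:
--                 i += 1
--         else:
--             c = text[i]
--             if c == '{':
--                 depth += 1
--             elif c == '}':
--                 depth -= 1
--                 if depth == 0:
--                     spans.append((start, i + 1, text[start + 7:i]))
--             i += 1
--     return spans
-- ===== Notes on version B (the rewrite author's own statement) =====
-- stated objective: alternative
-- what changed: Replaces A's find('\boxed{')-then-inner-brace-loop structure by one left-to-right character scan with a depth/start state machine and no str.find.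
import Mathlib
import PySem

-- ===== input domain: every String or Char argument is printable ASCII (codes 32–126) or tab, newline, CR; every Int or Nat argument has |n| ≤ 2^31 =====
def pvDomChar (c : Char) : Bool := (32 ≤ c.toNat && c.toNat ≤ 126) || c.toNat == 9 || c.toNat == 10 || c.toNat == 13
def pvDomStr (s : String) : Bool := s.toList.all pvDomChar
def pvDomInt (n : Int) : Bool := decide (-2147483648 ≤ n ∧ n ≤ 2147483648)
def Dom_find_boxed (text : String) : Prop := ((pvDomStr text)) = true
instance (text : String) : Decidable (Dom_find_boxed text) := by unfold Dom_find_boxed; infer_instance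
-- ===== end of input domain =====

-- B replaces A's find("\boxed{")-then-inner-brace-loop structure by a single
-- left-to-right depth/start state-machine scan with no str.find
-- (objective: alternative, same asymptotic cost).

-- ===== PORT A =====

-- the literal "\boxed{" (7 characters)
def pvPat : List Char := "\\boxed{".toList

-- A's inner `while j < len(text)` brace loop: returns the index j of the closing
-- brace at which depth hits 0 (the `break`), or none if the loop runs off the end.
-- `fuel` is only a totality guard (the loop runs at most s.length - j steps);
-- `s[j]` with the in-range proof is exact for Python's text[j] with 0 ≤ j < len.
def pvCloseScan (s : List Char) (fuel j : Nat) (depth : Int) : Option Nat :=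
  match fuel with
  | 0 => none
  | fuel' + 1 =>
    if h : j < s.length then
      if s[j] = '{' then pvCloseScan s fuel' (j + 1) (depth + 1)
      else if s[j] = '}' then
        if depth - 1 = 0 then some j else pvCloseScan s fuel' (j + 1) (depth - 1)
      else pvCloseScan s fuel' (j + 1) depth
    else none

-- A's outer `while i < len(text)` loop; text.find("\boxed{", i) is
-- PySem.Chars.findFrom (result -1 is the `break`); spans accumulate as the
-- cons'es; when the inner loop runs off the end Python sets i = len(text),
-- the outer condition fails and the spans so far are returned ([] here).
-- `fuel` is only a totality guard (each iteration moves i forward).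
def pvAOuter (s : List Char) (fuel i : Nat) : List (Int × Int × String) :=
  match fuel with
  | 0 => []
  | fuel' + 1 =>
    if i < s.length then
      let r := PySem.Chars.findFrom s pvPat (i : Int) none
      if r = -1 then []
      else
        match pvCloseScan s s.length (r.toNat + 6) 0 with
        | some j =>
            ((r.toNat : Int), (j : Int) + 1,
              String.ofList ((s.drop (r.toNat + 7)).take (j - (r.toNat + 7)))) ::
              pvAOuter s fuel' (j + 1)
        | none => []
    else []

def find_boxed (text : String) : List (Int × Int × String) :=
  pvAOuter text.toList (text.toList.length + 1) 0

-- ===== PORT B =====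

-- B's single scan; state = (i, depth, start); text.startswith("\boxed{", i) is
-- startswith on s.drop i (exact for 0 ≤ i); the slice text[start+7:i] with
-- 0 ≤ start+7 ≤ i is exactly drop/take; `fuel` is only a totality guard
-- (i advances every step).
def pvBScan (s : List Char) (fuel i : Nat) (depth : Int) (start : Nat) :
    List (Int × Int × String) :=
  match fuel with
  | 0 => []
  | fuel' + 1 =>
    if h : i < s.length then
      if depth = 0 then
        if PySem.Chars.startswith (s.drop i) pvPat then pvBScan s fuel' (i + 7) 1 i
        else pvBScan s fuel' (i + 1) 0 start
      else
        if s[i] = '{' then pvBScan s fuel' (i + 1) (depth + 1) start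
        else if s[i] = '}' then
          if depth - 1 = 0 then
            ((start : Int), (i : Int) + 1,
              String.ofList ((s.drop (start + 7)).take (i - (start + 7)))) ::
              pvBScan s fuel' (i + 1) 0 start
          else pvBScan s fuel' (i + 1) (depth - 1) start
        else pvBScan s fuel' (i + 1) depth start
    else []

def find_boxed_alt (text : String) : List (Int × Int × String) :=
  pvBScan text.toList (text.toList.length + 1) 0 0 0

-- ===== PRECONDITION & SPEC =====
def Spec_find_boxed (text : String) (out : List (Int × Int × String)) : Prop := out = find_boxed_alt text
instance (text : String) (out : List (Int × Int × String)) : Decidable (Spec_find_boxed text out) := by unfold Spec_find_boxed; infer_instance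

-- ===== CLAIM (what is proved, stated in full; the proofs are below) =====
def Claim_equal_find_boxed : Prop := ∀ (text : String), Dom_find_boxed text → Spec_find_boxed text (find_boxed text)

-- ===== LEMMAS AND PROOFS =====

theorem pvCloseScan_out (s : List Char) (f j : Nat) (d : Int) (hj : s.length ≤ j) :
    pvCloseScan s f j d = none := by
  cases f with
  | zero => rfl
  | succ f' => rw [pvCloseScan]; simp [show ¬ j < s.length by omega]

theorem pvCloseScan_ge (s : List Char) (f : Nat) :
    ∀ j d k, pvCloseScan s f j d = some k → j ≤ k ∧ k < s.length := by
  induction f with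
  | zero => intro j d k h; cases h
  | succ f ih =>
      intro j d k h
      rw [pvCloseScan] at h
      by_cases hj : j < s.length
      · simp only [dif_pos hj] at h
        split_ifs at h with h1 h2 h3
        · have := ih _ _ _ h; omega
        · injection h with h; omega
        · have := ih _ _ _ h; omega
        · have := ih _ _ _ h; omega
      · simp [dif_neg hj] at h

theorem pvCloseScan_irrel (s : List Char) (f1 : Nat) :
    ∀ f2 j d, s.length ≤ f1 + j → s.length ≤ f2 + j →
      pvCloseScan s f1 j d = pvCloseScan s f2 j d := by
  induction f1 with
  | zero =>
      intro f2 j d h1 h2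
      rw [pvCloseScan_out s 0 j d (by omega), pvCloseScan_out s f2 j d (by omega)]
  | succ f1 ih =>
      intro f2 j d h1 h2
      by_cases hj : j < s.length
      · obtain ⟨f2', rfl⟩ : ∃ f2', f2 = f2' + 1 := ⟨f2 - 1, by omega⟩
        rw [pvCloseScan, pvCloseScan]
        simp only [dif_pos hj]
        split_ifs
        · exact ih f2' (j + 1) (d + 1) (by omega) (by omega)
        · rfl
        · exact ih f2' (j + 1) (d - 1) (by omega) (by omega)
        · exact ih f2' (j + 1) d (by omega) (by omega)
      · rw [pvCloseScan_out s _ j d (by omega), pvCloseScan_out s f2 j d (by omega)]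

theorem pvBScan_out (s : List Char) (f i : Nat) (d : Int) (st : Nat)
    (hi : s.length ≤ i) : pvBScan s f i d st = [] := by
  cases f with
  | zero => rfl
  | succ f' => rw [pvBScan]; simp [show ¬ i < s.length by omega]

theorem pvBScan_irrel (s : List Char) (f1 : Nat) :
    ∀ f2 i d st, s.length ≤ f1 + i → s.length ≤ f2 + i →
      pvBScan s f1 i d st = pvBScan s f2 i d st := by
  induction f1 with
  | zero =>
      intro f2 i d st h1 h2
      rw [pvBScan_out s 0 i d st (by omega), pvBScan_out s f2 i d st (by omega)]
  | succ f1 ih =>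
      intro f2 i d st h1 h2
      by_cases hi : i < s.length
      · obtain ⟨f2', rfl⟩ : ∃ f2', f2 = f2' + 1 := ⟨f2 - 1, by omega⟩
        rw [pvBScan, pvBScan]
        simp only [dif_pos hi]
        split_ifs
        · exact ih f2' (i + 7) 1 i (by omega) (by omega)
        · exact ih f2' (i + 1) 0 st (by omega) (by omega)
        · exact ih f2' (i + 1) (d + 1) st (by omega) (by omega)
        · rw [ih f2' (i + 1) 0 st (by omega) (by omega)]
        · exact ih f2' (i + 1) (d - 1) st (by omega) (by omega)
        · exact ih f2' (i + 1) d st (by omega) (by omega)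
      · rw [pvBScan_out s _ i d st (by omega), pvBScan_out s f2 i d st (by omega)]

-- while depth ≥ 1, B's scan is exactly A's inner brace loop followed by the append
theorem pvBScan_inBox (s : List Char) (f : Nat) :
    ∀ j d st, s.length ≤ f + j → 1 ≤ d →
      pvBScan s f j d st =
        match pvCloseScan s f j d with
        | some k =>
            ((st : Int), (k : Int) + 1,
              String.ofList ((s.drop (st + 7)).take (k - (st + 7)))) ::
              pvBScan s (s.length + 1) (k + 1) 0 st
        | none => [] := by
  induction f with
  | zero =>
      intro j d st h1 hd
      rw [pvBScan_out s 0 j d st (by omega)]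
      rfl
  | succ f ih =>
      intro j d st h1 hd
      by_cases hj : j < s.length
      · rw [pvBScan, pvCloseScan]
        simp only [dif_pos hj, if_neg (show ¬ d = 0 by omega)]
        by_cases hc1 : s[j] = '{'
        · simp only [if_pos hc1]
          exact ih (j + 1) (d + 1) st (by omega) (by omega)
        · by_cases hc2 : s[j] = '}'
          · simp only [if_neg hc1, if_pos hc2]
            by_cases hdd : d - 1 = 0
            · simp only [if_pos hdd]
              rw [pvBScan_irrel s f (s.length + 1) (j + 1) 0 st (by omega) (by omega)]
            · simp only [if_neg hdd]
              exact ih (j + 1) (d - 1) st (by omega) (by omega)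
          · simp only [if_neg hc1, if_neg hc2]
            exact ih (j + 1) d st (by omega) (by omega)
      · rw [pvBScan_out s _ j d st (by omega), pvCloseScan_out s _ j d (by omega)]

-- if "\boxed{" starts at i, str.find from i returns i
theorem pvFind_here (s : List Char) (i : Nat) (hi : i ≤ s.length)
    (hm : pvPat <+: s.drop i) :
    PySem.Chars.findFrom s pvPat (i : Int) none = (i : Int) := by
  have hne : PySem.Chars.findFrom s pvPat (i : Int) none ≠ -1 := by
    intro h
    rw [PySem.Chars.findFrom_natCast_eq_neg_one_iff s pvPat i hi] at h
    exact h hm.isInfix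
  obtain ⟨h1, h2, h3⟩ := PySem.Chars.findFrom_natCast_spec s pvPat i hi hne
  by_cases hlt : i < (PySem.Chars.findFrom s pvPat (i : Int) none).toNat
  · exact absurd hm (h3 i (le_refl _) hlt)
  · omega

-- if "\boxed{" does not start at i, str.find from i equals str.find from i+1
theorem pvFind_shift (s : List Char) (i : Nat) (hi : i < s.length)
    (hnm : ¬ pvPat <+: s.drop i) :
    PySem.Chars.findFrom s pvPat (i : Int) none
      = PySem.Chars.findFrom s pvPat ((i + 1 : Nat) : Int) none := by
  have hi1 : i + 1 ≤ s.length := hi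
  have hsuf : ∀ m : Nat, i ≤ m → s.drop m <:+ s.drop i := by
    intro m hm
    have h : (s.drop i).drop (m - i) = s.drop m := by
      rw [List.drop_drop]; congr 1; omega
    rw [← h]; exact List.drop_suffix _ _
  by_cases h1 : PySem.Chars.findFrom s pvPat (i : Int) none = -1
  · rw [h1]
    symm
    rw [PySem.Chars.findFrom_natCast_eq_neg_one_iff s pvPat (i+1) hi1]
    rw [PySem.Chars.findFrom_natCast_eq_neg_one_iff s pvPat i (by omega)] at h1
    intro hinf
    exact h1 (hinf.trans (hsuf (i+1) (by omega)).isInfix)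
  · obtain ⟨ha1, ha2, ha3⟩ := PySem.Chars.findFrom_natCast_spec s pvPat i (by omega) h1
    set r := PySem.Chars.findFrom s pvPat (i : Int) none with hr
    have hri : i + 1 ≤ r.toNat := by
      rcases Nat.lt_or_ge i r.toNat with h | h
      · omega
      · exfalso
        have h' : r.toNat = i := by omega
        rw [h'] at ha2; exact hnm ha2
    have h2ne : PySem.Chars.findFrom s pvPat ((i+1 : Nat) : Int) none ≠ -1 := by
      intro h
      rw [PySem.Chars.findFrom_natCast_eq_neg_one_iff s pvPat (i+1) hi1] at h
      have hdd : (s.drop (i+1)).drop (r.toNat - (i+1)) = s.drop r.toNat := by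
        rw [List.drop_drop]; congr 1; omega
      have hsuf2 : s.drop r.toNat <:+ s.drop (i+1) := by
        rw [← hdd]; exact List.drop_suffix _ _
      exact h ((ha2.isInfix).trans hsuf2.isInfix)
    obtain ⟨hb1, hb2, hb3⟩ := PySem.Chars.findFrom_natCast_spec s pvPat (i+1) hi1 h2ne
    set r' := PySem.Chars.findFrom s pvPat ((i+1 : Nat) : Int) none with hr'
    have e : r.toNat = r'.toNat := by
      rcases Nat.lt_trichotomy r.toNat r'.toNat with h | h | h
      · exact absurd ha2 (hb3 r.toNat hri h)
      · exact h
      · exact absurd hb2 (ha3 r'.toNat (by omega) h)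
    omega

-- A's outer loop skips a position where "\boxed{" does not start
theorem pvAOuter_shift (s : List Char) (f i : Nat) (hi : i < s.length)
    (hnm : ¬ pvPat <+: s.drop i) :
    pvAOuter s (f + 1) i = pvAOuter s (f + 1) (i + 1) := by
  have hsh := pvFind_shift s i hi hnm
  by_cases h2 : i + 1 < s.length
  · rw [pvAOuter, pvAOuter]
    simp only [if_pos hi, if_pos h2, hsh]
  · have hf : PySem.Chars.findFrom s pvPat ((i + 1 : Nat) : Int) none = -1 := by
      rw [PySem.Chars.findFrom_natCast_eq_neg_one_iff s pvPat (i+1) (by omega)]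
      intro h
      rw [show i + 1 = s.length by omega, List.drop_length] at h
      have := List.eq_nil_of_infix_nil h
      simp [pvPat] at this
    rw [pvAOuter, pvAOuter]
    simp only [if_pos hi, if_neg h2, hsh, hf]
    simp

theorem pvMainAux (s : List Char) (m : Nat) :
    ∀ i st fa fb, s.length - i ≤ m → s.length ≤ fa + i → s.length ≤ fb + i →
      pvAOuter s fa i = pvBScan s fb i 0 st := by
  induction m with
  | zero =>
      intro i st fa fb h hfa hfb
      rw [pvBScan_out s fb i 0 st (by omega)]
      cases fa with
      | zero => rfl
      | succ fa' => rw [pvAOuter]; simp [show ¬ i < s.length by omega]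
  | succ m ih =>
      intro i st fa fb h hfa hfb
      by_cases hi : i < s.length
      · obtain ⟨fa', rfl⟩ : ∃ fa', fa = fa' + 1 := ⟨fa - 1, by omega⟩
        obtain ⟨fb', rfl⟩ : ∃ fb', fb = fb' + 1 := ⟨fb - 1, by omega⟩
        by_cases hm : pvPat <+: s.drop i
        · -- a box starts at i
          have h7 : i + 7 ≤ s.length := by
            have h1 := hm.length_le
            simp [pvPat] at h1
            omega
          have hbr : s[i + 6]? = some '{' := by
            obtain ⟨t, ht⟩ := hm
            have h6 : (s.drop i)[6]? = some '{' := by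
              rw [← ht]
              rw [List.getElem?_append_left (by simp [pvPat])]
              decide
            rw [List.getElem?_drop] at h6
            exact h6
          have hbr' : s[i + 6]'(by omega) = '{' := by
            have hg : s[i + 6]? = some (s[i + 6]'(by omega)) :=
              List.getElem?_eq_getElem (by omega)
            rw [hg] at hbr
            exact Option.some.inj hbr
          have hstep : pvCloseScan s s.length (i + 6) 0 = pvCloseScan s fb' (i + 7) 1 := by
            obtain ⟨n', hn'⟩ : ∃ n', s.length = n' + 1 := ⟨s.length - 1, by omega⟩
            rw [hn', pvCloseScan]
            simp only [dif_pos (show i + 6 < s.length by omega), hbr']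
            exact pvCloseScan_irrel s n' fb' (i + 7) 1 (by omega) (by omega)
          -- unfold A one outer iteration
          rw [pvAOuter]
          simp only [if_pos hi, pvFind_here s i (by omega) hm,
            show ¬ ((i : Int) = -1) by omega, Int.toNat_natCast, hstep]
          -- unfold B up to the end of this box
          rw [pvBScan]
          simp only [dif_pos hi,
            if_pos ((PySem.Chars.startswith_iff _ _).mpr hm)]
          rw [pvBScan_inBox s fb' (i + 7) 1 i (by omega) (by omega)]
          rcases hcs : pvCloseScan s fb' (i + 7) 1 with _ | k
          · simp
          · have hk := pvCloseScan_ge s fb' (i + 7) 1 k hcs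
            simp only [if_true, if_false]
            rw [ih (k + 1) i fa' (s.length + 1) (by omega) (by omega) (by omega)]
        · -- no box starts at i
          have hsw : ¬ (PySem.Chars.startswith (s.drop i) pvPat = true) := by
            rw [PySem.Chars.startswith_iff]
            exact hm
          rw [pvAOuter_shift s fa' i hi hm]
          rw [pvBScan]
          simp only [dif_pos hi, if_neg hsw]
          exact ih (i + 1) st (fa' + 1) fb' (by omega) (by omega) (by omega)
      · rw [pvBScan_out s _ i 0 st (by omega)]
        cases fa with
        | zero => rfl
        | succ fa' => rw [pvAOuter]; simp [hi]

-- ===== VERDICT (by name: the statement is the Claim_ definition above) =====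
theorem find_boxed_spec : Claim_equal_find_boxed := by
  intro text _
  unfold Spec_find_boxed find_boxed find_boxed_alt
  exact (pvMainAux text.toList text.toList.length 0 0 (text.toList.length + 1)
    (text.toList.length + 1) (by omega) (by omega) (by omega)).symm ▸ rfl
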